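-- pv_equiv track=rewrite | github.com/LiangYu-Xidian/MulStack | ModelandWebServer/util.py | frequency_p
-- ===== SOURCE A (Python) =====
-- def frequency_p(tol_str, tar_str):
--     """Generate the frequency of tar_str in tol_str.
--
--     :param tol_str: mother string.
--     :param tar_str: substring.
--     """
--     i, j, tar_count, tar1_count, tar2_count, tar3_count = 0, 0, 0, 0, 0, 0
--     tar_list = []
--     len_tol_str = len(tol_str)
--     len_tar_str = len(tar_str)
--     while i < len_tol_str and j < len_tar_str:
--         if tol_str[i] == tar_str[j]:
--             i += 1
--             j += 1
--             if j >= len_tar_str: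
--                 tar_count += 1
--                 i = i - j + 1
--                 j = 0
--                 if (
--                         i + 1) % 3 == 1:  # judge the position of last base of kmer in corresponding codon. pay attention to "i + 1"
--
--                     tar1_count += 1
--                 elif (i + 1) % 3 == 2:
--                     tar2_count += 1
--                 else:
--                     tar3_count += 1
--         else:
--             i = i - j + 1
--             j = 0
--     tar_list = (tar_count, tar1_count, tar2_count, tar3_count)
--     return tar_list
-- ===== SOURCE B (Python) =====
-- def frequency_p(tol_str, tar_str):
--     """Generate the frequency of tar_str in tol_str.
--
--     :param tol_str: mother string.
--     :param tar_str: substring.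
--     """
--     m = len(tar_str)
--     if m == 0:
--         starts = []
--     else:
--         starts = [s for s in range(len(tol_str) + 1 - m) if tol_str[s:s + m] == tar_str]
--     return (len(starts),
--             sum(1 for s in starts if (s + 2) % 3 == 1),
--             sum(1 for s in starts if (s + 2) % 3 == 2),
--             sum(1 for s in starts if (s + 2) % 3 == 0))
-- ===== Notes on version B (the rewrite author's own statement) =====
-- stated objective: faster
-- what changed: Replaces A's interleaved two-pointer backtracking state machine by first collecting the list of all overlapping match starts with per-position slice comparisons, then deriving the total and the three codon-position counts from that list by counting (s+2)%3 classes.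
import Mathlib
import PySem

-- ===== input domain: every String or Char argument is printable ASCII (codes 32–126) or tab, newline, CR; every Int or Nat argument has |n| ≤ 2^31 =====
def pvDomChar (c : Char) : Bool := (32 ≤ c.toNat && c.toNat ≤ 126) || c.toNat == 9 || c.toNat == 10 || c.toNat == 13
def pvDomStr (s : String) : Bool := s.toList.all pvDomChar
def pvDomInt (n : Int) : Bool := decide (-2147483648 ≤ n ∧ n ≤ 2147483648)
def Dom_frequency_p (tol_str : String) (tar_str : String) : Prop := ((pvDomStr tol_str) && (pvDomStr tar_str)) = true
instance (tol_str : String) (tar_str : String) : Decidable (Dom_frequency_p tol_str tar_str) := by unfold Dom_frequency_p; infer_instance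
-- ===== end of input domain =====

-- B replaces A's two-pointer backtracking scan by a list of all match starts plus per-class counts
-- over it; measured faster in Python by a constant factor (slice comparison instead of a char loop).

-- ===== PORT A =====
-- A's while-loop: state (i, j, tar_count, tar1_count, tar2_count, tar3_count), literal branch structure.
def pvLoopA (tol tar : List Char) (i j tc t1 t2 t3 : Nat) : List Int :=
  if h : i < tol.length ∧ j < tar.length then
    if tol[i]'h.1 = tar[j]'h.2 then
      -- i += 1; j += 1; if j >= len_tar: full match; i = i - j + 1; j = 0; classify (i + 1) % 3
      if tar.length ≤ j + 1 then
        if (i + 1 - (j + 1) + 1 + 1) % 3 = 1 then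
          pvLoopA tol tar (i + 1 - (j + 1) + 1) 0 (tc + 1) (t1 + 1) t2 t3
        else if (i + 1 - (j + 1) + 1 + 1) % 3 = 2 then
          pvLoopA tol tar (i + 1 - (j + 1) + 1) 0 (tc + 1) t1 (t2 + 1) t3
        else
          pvLoopA tol tar (i + 1 - (j + 1) + 1) 0 (tc + 1) t1 t2 (t3 + 1)
      else
        pvLoopA tol tar (i + 1) (j + 1) tc t1 t2 t3
    else
      pvLoopA tol tar (i - j + 1) 0 tc t1 t2 t3
  else [(tc : Int), (t1 : Int), (t2 : Int), (t3 : Int)]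
termination_by (tol.length - (i - j), tar.length - j)
decreasing_by
  · rw [Nat.succ_sub_succ, Nat.sub_zero]
    exact Prod.Lex.left _ _ (Nat.sub_succ_lt_self _ _ (Nat.lt_of_le_of_lt (Nat.sub_le i j) h.1))
  · rw [Nat.succ_sub_succ, Nat.sub_zero]
    exact Prod.Lex.left _ _ (Nat.sub_succ_lt_self _ _ (Nat.lt_of_le_of_lt (Nat.sub_le i j) h.1))
  · rw [Nat.succ_sub_succ, Nat.sub_zero]
    exact Prod.Lex.left _ _ (Nat.sub_succ_lt_self _ _ (Nat.lt_of_le_of_lt (Nat.sub_le i j) h.1))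
  · rw [Nat.succ_sub_succ]
    exact Prod.Lex.right _ (Nat.sub_succ_lt_self _ _ h.2)
  · rw [Nat.sub_zero]
    exact Prod.Lex.left _ _ (Nat.sub_succ_lt_self _ _ (Nat.lt_of_le_of_lt (Nat.sub_le i j) h.1))

def frequency_p (tol_str : String) (tar_str : String) : List Int :=
  pvLoopA tol_str.toList tar_str.toList 0 0 0 0 0 0

-- ===== PORT B =====
-- Source B: collect the list of all match starts (slice tol_str[s:s+m] ported as (drop s).take m,
-- exact for s ≥ 0), then len(...) and the three sum(1 for s in starts if …) ported as countP.
def frequency_p_alt (tol_str : String) (tar_str : String) : List Int :=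
  let tol := tol_str.toList
  let tar := tar_str.toList
  let m := tar.length
  let starts : List Nat :=
    if m = 0 then []
    else (List.range (tol.length + 1 - m)).filter (fun s => (tol.drop s).take m == tar)
  [(starts.length : Int),
   (starts.countP (fun s => (s + 2) % 3 == 1) : Int),
   (starts.countP (fun s => (s + 2) % 3 == 2) : Int),
   (starts.countP (fun s => (s + 2) % 3 == 0) : Int)]

-- ===== PRECONDITION & SPEC =====
def Spec_frequency_p (tol_str : String) (tar_str : String) (out : List Int) : Prop := out = frequency_p_alt tol_str tar_str
instance (tol_str : String) (tar_str : String) (out : List Int) : Decidable (Spec_frequency_p tol_str tar_str out) := by unfold Spec_frequency_p; infer_instance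

-- ===== CLAIM (what is proved, stated in full; the proofs are below) =====
def Claim_equal_frequency_p : Prop := ∀ (tol_str : String) (tar_str : String), Dom_frequency_p tol_str tar_str → Spec_frequency_p tol_str tar_str (frequency_p tol_str tar_str)

-- ===== LEMMAS AND PROOFS =====

theorem pvLoopA_noRoom (tol tar : List Char) :
    ∀ i j tc t1 t2 t3 : Nat, j ≤ i → j < tar.length → tol.length < i - j + tar.length →
    pvLoopA tol tar i j tc t1 t2 t3 = [(tc : Int), (t1 : Int), (t2 : Int), (t3 : Int)] := by
  intro i j tc t1 t2 t3
  induction i, j, tc, t1, t2, t3 using pvLoopA.induct tol tar with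
  | case1 i j tc t1 t2 t3 h heq hfull hmod ih =>
      intro hji hjm hn; exact absurd h.1 (by omega)
  | case2 i j tc t1 t2 t3 h heq hfull hm1 hmod ih =>
      intro hji hjm hn; exact absurd h.1 (by omega)
  | case3 i j tc t1 t2 t3 h heq hfull hm1 hm2 ih =>
      intro hji hjm hn; exact absurd h.1 (by omega)
  | case4 i j tc t1 t2 t3 h heq hfull ih =>
      intro hji hjm hn
      rw [pvLoopA, dif_pos h, if_pos heq, if_neg hfull]
      exact ih (by omega) (by omega) (by omega)
  | case5 i j tc t1 t2 t3 h heq ih =>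
      intro hji hjm hn
      rw [pvLoopA, dif_pos h, if_neg heq]
      exact ih (by omega) (by omega) (by omega)
  | case6 i j tc t1 t2 t3 h =>
      intro hji hjm hn
      rw [pvLoopA, dif_neg h]

theorem take_succ_eq (l tar : List Char) (s j : Nat) (hsj : s + j < l.length)
    (hj : j < tar.length)
    (hpre : (l.drop s).take j = tar.take j) (hc : l[s + j]'hsj = tar[j]'hj) :
    (l.drop s).take (j + 1) = tar.take (j + 1) := by
  rw [List.take_add_one, List.take_add_one, hpre]
  congr 1
  rw [List.getElem?_drop]
  rw [List.getElem?_eq_getElem hsj, List.getElem?_eq_getElem hj, hc]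

-- matchAt is false when the window does not fit
theorem matchAt_false_of_noRoom (tol tar : List Char) (s : Nat)
    (h : tol.length < s + tar.length) (hm : 0 < tar.length) :
    ¬ (tol.drop s).take tar.length = tar := by
  intro he
  have := congrArg List.length he
  simp [List.length_take, List.length_drop] at this
  omega

theorem pvLoopA_step (tol tar : List Char) :
    ∀ i j tc t1 t2 t3 : Nat, j ≤ i → j < tar.length →
    (tol.drop (i - j)).take j = tar.take j →
    pvLoopA tol tar i j tc t1 t2 t3 =
      if (tol.drop (i - j)).take tar.length = tar then
        if (i - j + 2) % 3 = 1 then pvLoopA tol tar (i - j + 1) 0 (tc + 1) (t1 + 1) t2 t3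
        else if (i - j + 2) % 3 = 2 then pvLoopA tol tar (i - j + 1) 0 (tc + 1) t1 (t2 + 1) t3
        else pvLoopA tol tar (i - j + 1) 0 (tc + 1) t1 t2 (t3 + 1)
      else if i - j + tar.length ≤ tol.length then pvLoopA tol tar (i - j + 1) 0 tc t1 t2 t3
      else [(tc : Int), (t1 : Int), (t2 : Int), (t3 : Int)] := by
  intro i j tc t1 t2 t3
  induction i, j, tc, t1, t2, t3 using pvLoopA.induct tol tar with
  | case1 i j tc t1 t2 t3 h heq hfull hmod ih =>
      intro hji hjm hpre
      have hij : i - j + j = i := by omega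
      have hsj : (i - j) + j < tol.length := by omega
      have hm : tar.length = j + 1 := by omega
      have hmA : (tol.drop (i - j)).take tar.length = tar := by
        rw [hm]
        rw [take_succ_eq tol tar (i - j) j hsj hjm hpre (by simp [hij]; exact heq)]
        rw [← hm, List.take_length]
      rw [pvLoopA, dif_pos h, if_pos heq, if_pos hfull, if_pos (by omega : (i + 1 - (j + 1) + 1 + 1) % 3 = 1)]
      rw [if_pos hmA, if_pos (by omega : (i - j + 2) % 3 = 1)]
      congr 1
      omega
  | case2 i j tc t1 t2 t3 h heq hfull hm1 hmod ih =>
      intro hji hjm hpre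
      have hij : i - j + j = i := by omega
      have hsj : (i - j) + j < tol.length := by omega
      have hm : tar.length = j + 1 := by omega
      have hmA : (tol.drop (i - j)).take tar.length = tar := by
        rw [hm]
        rw [take_succ_eq tol tar (i - j) j hsj hjm hpre (by simp [hij]; exact heq)]
        rw [← hm, List.take_length]
      rw [pvLoopA, dif_pos h, if_pos heq, if_pos hfull, if_neg (by omega : ¬ (i + 1 - (j + 1) + 1 + 1) % 3 = 1),
          if_pos (by omega : (i + 1 - (j + 1) + 1 + 1) % 3 = 2)]
      rw [if_pos hmA, if_neg (by omega : ¬ (i - j + 2) % 3 = 1), if_pos (by omega : (i - j + 2) % 3 = 2)]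
      congr 1
      omega
  | case3 i j tc t1 t2 t3 h heq hfull hm1 hm2 ih =>
      intro hji hjm hpre
      have hij : i - j + j = i := by omega
      have hsj : (i - j) + j < tol.length := by omega
      have hm : tar.length = j + 1 := by omega
      have hmA : (tol.drop (i - j)).take tar.length = tar := by
        rw [hm]
        rw [take_succ_eq tol tar (i - j) j hsj hjm hpre (by simp [hij]; exact heq)]
        rw [← hm, List.take_length]
      rw [pvLoopA, dif_pos h, if_pos heq, if_pos hfull, if_neg (by omega : ¬ (i + 1 - (j + 1) + 1 + 1) % 3 = 1),
          if_neg (by omega : ¬ (i + 1 - (j + 1) + 1 + 1) % 3 = 2)]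
      rw [if_pos hmA, if_neg (by omega : ¬ (i - j + 2) % 3 = 1), if_neg (by omega : ¬ (i - j + 2) % 3 = 2)]
      congr 1
      omega
  | case4 i j tc t1 t2 t3 h heq hfull ih =>
      intro hji hjm hpre
      have hij : i - j + j = i := by omega
      have hsj : (i - j) + j < tol.length := by omega
      have hpre' : (tol.drop (i + 1 - (j + 1))).take (j + 1) = tar.take (j + 1) := by
        have : i + 1 - (j + 1) = i - j := by omega
        rw [this]
        exact take_succ_eq tol tar (i - j) j hsj hjm hpre (by simp [hij]; exact heq)
      rw [pvLoopA, dif_pos h, if_pos heq, if_neg hfull]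
      have hres := ih (by omega) (by omega) hpre'
      rw [hres]
      have : i + 1 - (j + 1) = i - j := by omega
      rw [this]
  | case5 i j tc t1 t2 t3 h heq ih =>
      intro hji hjm hpre
      have hij : i - j + j = i := by omega
      have hmA : ¬ (tol.drop (i - j)).take tar.length = tar := by
        intro he
        apply heq
        have h1 : ((tol.drop (i - j)).take tar.length)[j]? = tar[j]? := by rw [he]
        rw [List.getElem?_take_of_lt hjm, List.getElem?_drop, hij] at h1
        rw [List.getElem?_eq_getElem h.1, List.getElem?_eq_getElem hjm] at h1
        exact Option.some.inj h1
      rw [pvLoopA, dif_pos h, if_neg heq, if_neg hmA]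
      by_cases hroom : i - j + tar.length ≤ tol.length
      · rw [if_pos hroom]
      · rw [if_neg hroom]
        exact pvLoopA_noRoom tol tar (i - j + 1) 0 tc t1 t2 t3 (by omega) (by omega) (by omega)
  | case6 i j tc t1 t2 t3 h =>
      intro hji hjm hpre
      have hin : tol.length ≤ i := by omega
      rw [pvLoopA, dif_neg h]
      rw [if_neg (matchAt_false_of_noRoom tol tar (i - j) (by omega) (by omega)),
          if_neg (by omega : ¬ i - j + tar.length ≤ tol.length)]

theorem pvLoopA_from (tol tar : List Char) (hm : 0 < tar.length) :
    ∀ (k s tc t1 t2 t3 : Nat), tol.length + 1 - tar.length - s = k →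
    pvLoopA tol tar s 0 tc t1 t2 t3 =
      [((tc + (((List.range' s (tol.length + 1 - tar.length - s)).filter
            (fun x => (tol.drop x).take tar.length == tar)).length) : Nat) : Int),
       ((t1 + (((List.range' s (tol.length + 1 - tar.length - s)).filter
            (fun x => (tol.drop x).take tar.length == tar)).countP (fun x => (x + 2) % 3 == 1)) : Nat) : Int),
       ((t2 + (((List.range' s (tol.length + 1 - tar.length - s)).filter
            (fun x => (tol.drop x).take tar.length == tar)).countP (fun x => (x + 2) % 3 == 2)) : Nat) : Int),
       ((t3 + (((List.range' s (tol.length + 1 - tar.length - s)).filter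
            (fun x => (tol.drop x).take tar.length == tar)).countP (fun x => (x + 2) % 3 == 0)) : Nat) : Int)] := by
  intro k
  induction k with
  | zero =>
      intro s tc t1 t2 t3 hk
      rw [hk]
      simp only [List.range'_zero, List.filter_nil, List.length_nil, List.countP_nil, Nat.add_zero]
      by_cases hs : s < tol.length
      · exact pvLoopA_noRoom tol tar s 0 tc t1 t2 t3 (by omega) (by omega) (by omega)
      · rw [pvLoopA, dif_neg (fun hc => absurd hc.1 (by omega))]
  | succ k ih =>
      intro s tc t1 t2 t3 hk
      have hs : s + tar.length ≤ tol.length := by omega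
      have hstep := pvLoopA_step tol tar s 0 tc t1 t2 t3 (by omega) hm (by simp)
      simp only [Nat.sub_zero] at hstep
      rw [hstep, hk, List.range'_succ, List.filter_cons]
      have hk' : tol.length + 1 - tar.length - (s + 1) = k := by omega
      by_cases hmA : (tol.drop s).take tar.length = tar
      · rw [if_pos hmA]
        simp only [hmA, beq_self_eq_true, if_pos, List.length_cons, List.countP_cons]
        by_cases h1 : (s + 2) % 3 = 1
        · rw [if_pos h1, ih (s + 1) (tc + 1) (t1 + 1) t2 t3 hk', hk']
          simp only [List.cons.injEq, and_true]
          refine ⟨by push_cast; ring, by push_cast [h1]; simp; ring, ?_, ?_⟩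
          · have : ((s + 2) % 3 == 2) = false := by simp; omega
            simp [this]
          · have : ((s + 2) % 3 == 0) = false := by simp; omega
            simp [this]
        · by_cases h2 : (s + 2) % 3 = 2
          · rw [if_neg h1, if_pos h2, ih (s + 1) (tc + 1) t1 (t2 + 1) t3 hk', hk']
            simp only [List.cons.injEq, and_true]
            refine ⟨by push_cast; ring, ?_, by push_cast [h2]; simp; ring, ?_⟩
            · have : ((s + 2) % 3 == 1) = false := by simp; omega
              simp [this]
            · have : ((s + 2) % 3 == 0) = false := by simp; omega
              simp [this]
          · rw [if_neg h1, if_neg h2, ih (s + 1) (tc + 1) t1 t2 (t3 + 1) hk', hk']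
            have h0 : (s + 2) % 3 = 0 := by omega
            simp only [List.cons.injEq, and_true]
            refine ⟨by push_cast; ring, ?_, ?_, by push_cast [h0]; simp; ring⟩
            · have : ((s + 2) % 3 == 1) = false := by simp; omega
              simp [this]
            · have : ((s + 2) % 3 == 2) = false := by simp; omega
              simp [this]
      · rw [if_neg hmA, if_pos hs, ih (s + 1) tc t1 t2 t3 hk', hk']
        have : ((tol.drop s).take tar.length == tar) = false := by simp [hmA]
        simp [this]


-- ===== VERDICT (by name: the statement is the Claim_ definition above) =====
theorem frequency_p_spec : Claim_equal_frequency_p := by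
  intro tol_str tar_str _
  unfold Spec_frequency_p frequency_p frequency_p_alt
  by_cases hm : tar_str.toList.length = 0
  · rw [pvLoopA, dif_neg (by simp [hm])]
    simp [hm]
  · have h := pvLoopA_from tol_str.toList tar_str.toList (by omega)
      (tol_str.toList.length + 1 - tar_str.toList.length) 0 0 0 0 0 (by omega)
    simp only [Nat.sub_zero] at h
    rw [h]
    have hne : tar_str ≠ "" := by
      intro he; apply hm; rw [he]; rfl
    simp [List.range_eq_range', hne]
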